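-- pv_equiv track=rewrite | github.com/Msangwool/Algorithm | 프로그래머스/0/120869. 외계어 사전/외계어 사전.py | solution
-- ===== SOURCE A (Python) =====
-- def solution(spell, dic):
--     for s in dic:
--         if len(s) != len(spell):
--             continue
--
--         b = True
--         for i in spell:
--             if spell.count(i) != s.count(i):
--                 b = False
--                 break
--
--         if b:
--             return 1
--     return 2
-- ===== SOURCE B (Python) =====
-- def solution(spell, dic):
--     # Token-major sieve: instead of verifying each word against every element of
--     # spell, keep a candidate pool (words of the right length) and prune it once
--     # per DISTINCT element of spell; the answer is whether any candidate survives.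
--     n = len(spell)
--     cands = [s for s in dic if len(s) == n]
--     for t in dict.fromkeys(spell):
--         k = spell.count(t)
--         cands = [s for s in cands if s.count(t) == k]
--     return 1 if cands else 2
-- ===== Notes on version B (the rewrite author's own statement) =====
-- stated objective: alternative
-- what changed: B inverts the loop nesting: instead of A's word-major scan that re-verifies every element of spell against each word with an early break, B keeps a pool of length-matching candidate words and prunes the whole pool once per distinct element of spell (computing spell.count once per token), answering by whether the pool is non-empty.
import Mathlib
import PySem

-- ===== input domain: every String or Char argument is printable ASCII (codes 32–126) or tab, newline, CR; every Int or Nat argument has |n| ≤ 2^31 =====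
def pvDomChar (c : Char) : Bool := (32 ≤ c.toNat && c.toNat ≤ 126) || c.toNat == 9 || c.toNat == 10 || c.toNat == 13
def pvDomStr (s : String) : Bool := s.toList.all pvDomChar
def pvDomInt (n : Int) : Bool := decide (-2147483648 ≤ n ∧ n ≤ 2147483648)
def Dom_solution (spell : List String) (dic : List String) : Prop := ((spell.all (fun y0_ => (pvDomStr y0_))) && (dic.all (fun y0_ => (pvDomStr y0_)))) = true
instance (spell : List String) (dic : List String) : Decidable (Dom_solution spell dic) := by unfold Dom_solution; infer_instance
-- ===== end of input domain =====

-- B inverts the loop nesting: a pool of length-matching candidates is pruned once per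
-- distinct element of spell, instead of A's per-word verification scan (objective: alternative).

-- ===== PORT A =====
-- inner loop: b = True; for i in spell: if spell.count(i) != s.count(i): b = False; break
def solutionInner (spell : List String) (s : String) : List String → Bool
  | [] => true
  | i :: rest =>
    if PySem.List.count spell i ≠ PySem.Str.count s i then false
    else solutionInner spell s rest

-- outer loop over dic with early return 1, falling through to 2
def solutionLoop (spell : List String) : List String → Int
  | [] => 2
  | s :: rest =>
    if PySem.Str.len s ≠ (spell.length : Int) then solutionLoop spell rest
    else if solutionInner spell s spell then 1
    else solutionLoop spell rest

def solution (spell : List String) (dic : List String) : Int :=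
  solutionLoop spell dic

-- ===== PORT B =====
-- dict.fromkeys(spell) as ordered dedup is PySem.List.dedup
def solution_alt (spell : List String) (dic : List String) : Int :=
  let n : Int := (spell.length : Int)
  let cands0 := dic.filter (fun s => PySem.Str.len s == n)
  let cands := (PySem.List.dedup spell).foldl
    (fun cs t =>
      let k := PySem.List.count spell t
      cs.filter (fun s => PySem.Str.count s t == k))
    cands0
  if !cands.isEmpty then 1 else 2

-- ===== PRECONDITION & SPEC =====
def Spec_solution (spell : List String) (dic : List String) (out : Int) : Prop := out = solution_alt spell dic
instance (spell : List String) (dic : List String) (out : Int) : Decidable (Spec_solution spell dic out) := by unfold Spec_solution; infer_instance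

-- ===== CLAIM (what is proved, stated in full; the proofs are below) =====
def Claim_equal_solution : Prop := ∀ (spell : List String) (dic : List String), Dom_solution spell dic → Spec_solution spell dic (solution spell dic)

-- ===== LEMMAS AND PROOFS =====

-- A's inner loop is an `all` over spell
theorem solutionInner_eq_all (spell : List String) (s : String) (l : List String) :
    solutionInner spell s l
      = l.all (fun i => PySem.List.count spell i == PySem.Str.count s i) := by
  induction l with
  | nil => rfl
  | cons i rest ih =>
    simp only [solutionInner, List.all_cons, ih]
    simp [PySem.List.count, PySem.Str.count, beq_eq_decide]

-- A's loop computes `if any accepted then 1 else 2`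
theorem solutionLoop_eq (spell : List String) (dic : List String) :
    solutionLoop spell dic
      = (if dic.any (fun s =>
            decide (¬ PySem.Str.len s ≠ (spell.length : Int)) &&
              solutionInner spell s spell) then 1 else 2) := by
  induction dic with
  | nil => rfl
  | cons s rest ih =>
    simp only [solutionLoop, List.any_cons, ih]
    by_cases hlen : PySem.Str.len s ≠ (spell.length : Int)
    · simp only [PySem.Str.len, ne_eq, Int.natCast_inj,
        String.length_toList] at hlen
      simp [hlen]
    · simp only [PySem.Str.len, ne_eq, Int.natCast_inj,
        String.length_toList, not_not] at hlen
      rcases Bool.eq_false_or_eq_true (solutionInner spell s spell) with hb | hb <;>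
        simp [hlen, hb]

-- a fold of filters is one filter by the conjunction
theorem foldl_filter {α β : Type} (p : β → α → Bool) (toks : List β) (cs0 : List α) :
    toks.foldl (fun cs t => cs.filter (p t)) cs0
      = cs0.filter (fun s => toks.all (fun t => p t s)) := by
  induction toks generalizing cs0 with
  | nil => simp
  | cons t rest ih =>
    simp only [List.foldl_cons, ih, List.filter_filter]
    congr 1
    funext s
    simp [Bool.and_comm]

-- any is non-emptiness of the filter
theorem any_eq_not_isEmpty_filter {α : Type} (q : α → Bool) (l : List α) :
    l.any q = !(l.filter q).isEmpty := by
  induction l with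
  | nil => rfl
  | cons a t ih => cases h : q a <;> simp [h, ih]

-- the per-word acceptance tests of A and B agree
theorem accept_eq (spell : List String) (s : String) :
    (decide (¬ PySem.Str.len s ≠ ((spell.length : Nat) : Int)) &&
      solutionInner spell s spell)
      = ((PySem.List.dedup spell).all
            (fun t => PySem.Str.count s t == PySem.List.count spell t) &&
          (PySem.Str.len s == ((spell.length : Nat) : Int))) := by
  rw [solutionInner_eq_all, Bool.eq_iff_iff]
  simp only [Bool.and_eq_true, decide_eq_true_eq, not_not, List.all_eq_true,
    PySem.List.mem_dedup, beq_iff_eq]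
  constructor
  · rintro ⟨hlen, hall⟩
    exact ⟨fun t ht => (hall t ht).symm, hlen⟩
  · rintro ⟨hall, hlen⟩
    exact ⟨hlen, fun i hi => (hall i hi).symm⟩

-- ===== VERDICT (by name: the statement is the Claim_ definition above) =====
theorem solution_spec : Claim_equal_solution := by
  intro spell dic _
  show solution spell dic = solution_alt spell dic
  have halt : solution_alt spell dic
      = (if !((PySem.List.dedup spell).foldl
            (fun cs t => cs.filter
              (fun s => PySem.Str.count s t == PySem.List.count spell t))
            (dic.filter (fun s => PySem.Str.len s == ((spell.length : Nat) : Int)))).isEmpty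
          then 1 else 2) := rfl
  rw [halt, foldl_filter (fun t s => PySem.Str.count s t == PySem.List.count spell t),
      List.filter_filter]
  unfold solution
  rw [solutionLoop_eq, funext (accept_eq spell), any_eq_not_isEmpty_filter]
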